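-- pv_equiv track=rewrite | github.com/adriencances/Friends_code | generate_pairs.py | sample_modulo_2frame
-- ===== SOURCE A (Python) =====
-- from math import floor, ceil
--
-- SEGMENT_LENGTH = 16
--
-- def sample_modulo_1frame(begin, end, segment_length=SEGMENT_LENGTH):
--     step = ceil((end - begin + 1) / segment_length)
--     rest = segment_length*step - (end - begin + 1)
--     nb_shifts = step - rest
--     lists_of_frames = []
--     for shift in range(nb_shifts):
--         lists_of_frames.append([begin + shift + k*step for k in range(segment_length)])
--     return lists_of_frames
--
-- def sample_modulo_2frame(begin, end):
--     lists_of_frames_1frame = sample_modulo_1frame(begin, end, segment_length=8)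
--     nb_2frame = len(lists_of_frames_1frame) - 1
--     lists_of_frames_2frame = []
--     for index in range(nb_2frame):
--         frames_list = []
--         for shift in range(index, index + 2):
--             frames_list += lists_of_frames_1frame[shift]
--         lists_of_frames_2frame.append(sorted(frames_list))
--     return lists_of_frames_2frame
-- ===== SOURCE B (Python) =====
-- from math import ceil
--
--
-- def _merge(run1, run2):
--     # two-pointer merge of two ascending runs, keeping duplicates
--     merged = []
--     i = j = 0
--     while i < len(run1) and j < len(run2):
--         if run1[i] <= run2[j]:
--             merged.append(run1[i])
--             i += 1
--         else:
--             merged.append(run2[j])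
--             j += 1
--     merged.extend(run1[i:])
--     merged.extend(run2[j:])
--     return merged
--
--
-- def sample_modulo_2frame(begin, end):
--     n = end - begin + 1
--     step = ceil(n / 8)
--     nb_pairs = n - 7 * step - 1  # (number of length-8 windows) - 1
--     return [_merge([begin + index + k * step for k in range(8)],
--                    [begin + index + 1 + k * step for k in range(8)])
--             for index in range(nb_pairs)]
-- ===== Notes on version B (the rewrite author's own statement) =====
-- stated objective: alternative
-- what changed: B inlines the segment-window computation (step, number of windows computed once, no helper-built list of window lists) and produces each output row by a two-pointer merge of the two ascending 8-element arithmetic runs instead of concatenating them and calling sorted().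
import Mathlib
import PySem

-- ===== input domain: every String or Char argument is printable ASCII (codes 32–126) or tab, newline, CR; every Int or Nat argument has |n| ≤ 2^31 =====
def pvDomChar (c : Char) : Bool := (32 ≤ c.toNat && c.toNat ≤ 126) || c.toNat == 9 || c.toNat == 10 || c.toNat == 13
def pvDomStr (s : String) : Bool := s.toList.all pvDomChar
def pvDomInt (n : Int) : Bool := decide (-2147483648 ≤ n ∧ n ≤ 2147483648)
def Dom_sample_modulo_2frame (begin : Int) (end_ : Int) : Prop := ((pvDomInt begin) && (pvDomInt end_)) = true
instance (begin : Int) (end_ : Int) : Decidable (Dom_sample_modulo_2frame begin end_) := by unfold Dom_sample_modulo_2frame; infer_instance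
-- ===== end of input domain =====

-- B inlines the window computation and replaces "concatenate two ascending runs then sorted()" by a
-- two-pointer merge of the runs (objective: alternative; same asymptotic cost, no sort).

-- ===== PORT A =====
-- ceil(x / m) for positive integer m is -((-x) // m); Python's float ceil is exact on the sampled domain.
def sample_modulo_1frame_port (begin : Int) (end_ : Int) (segment_length : Int) : List (List Int) :=
  let step := -(PySem.Int.floordiv (-(end_ - begin + 1)) segment_length)
  let rest := segment_length * step - (end_ - begin + 1)
  let nb_shifts := step - rest
  (PySem.List.pyRange 0 nb_shifts 1).foldl
    (fun acc shift =>
      acc ++ [(PySem.List.pyRange 0 segment_length 1).map (fun k => begin + shift + k * step)]) []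

def sample_modulo_2frame (begin : Int) (end_ : Int) : List (List Int) :=
  let l1 := sample_modulo_1frame_port begin end_ 8
  let nb2 : Int := (l1.length : Int) - 1
  -- the list indexing lists_of_frames_1frame[shift] is always in range here (shift ≤ nb2 < len l1)
  (PySem.List.pyRange 0 nb2 1).foldl
    (fun acc index =>
      let frames := (PySem.List.pyRange index (index + 2) 1).foldl
        (fun fl shift => fl ++ PySem.List.pyGetD l1 shift []) []
      acc ++ [PySem.List.sorted frames (fun x => x) false]) []

-- ===== PORT B =====
-- two-pointer merge of two ascending runs (the while loop of Source B's _merge, pointers as peeled heads)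
def pvMergeRuns : List Int → List Int → List Int
  | [], ys => ys
  | x :: xs, [] => x :: xs
  | x :: xs, y :: ys =>
    if x ≤ y then x :: pvMergeRuns xs (y :: ys) else y :: pvMergeRuns (x :: xs) ys

def sample_modulo_2frame_alt (begin : Int) (end_ : Int) : List (List Int) :=
  let n := end_ - begin + 1
  let step := -(PySem.Int.floordiv (-n) 8)   -- ceil(n / 8)
  let nb_pairs := n - 7 * step - 1
  (PySem.List.pyRange 0 nb_pairs 1).map (fun index =>
    pvMergeRuns
      ((PySem.List.pyRange 0 8 1).map (fun k => begin + index + k * step))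
      ((PySem.List.pyRange 0 8 1).map (fun k => begin + index + 1 + k * step)))

-- ===== PRECONDITION & SPEC =====
def Spec_sample_modulo_2frame (begin : Int) (end_ : Int) (out : List (List Int)) : Prop := out = sample_modulo_2frame_alt begin end_
instance (begin : Int) (end_ : Int) (out : List (List Int)) : Decidable (Spec_sample_modulo_2frame begin end_ out) := by unfold Spec_sample_modulo_2frame; infer_instance

-- ===== CLAIM (what is proved, stated in full; the proofs are below) =====
def Claim_equal_sample_modulo_2frame : Prop := ∀ (begin : Int) (end_ : Int), Dom_sample_modulo_2frame begin end_ → Spec_sample_modulo_2frame begin end_ (sample_modulo_2frame begin end_)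

-- ===== LEMMAS AND PROOFS =====

lemma pvMergeRuns_perm (xs ys : List Int) : (pvMergeRuns xs ys).Perm (xs ++ ys) := by
  fun_induction pvMergeRuns xs ys with
  | case1 ys => simp
  | case2 x xs => simp
  | case3 x xs y ys h ih => simpa using ih.cons x
  | case4 x xs y ys h ih => exact (ih.cons y).trans List.perm_middle.symm

lemma pvMergeRuns_pairwise (xs ys : List Int)
    (hx : xs.Pairwise (· ≤ ·)) (hy : ys.Pairwise (· ≤ ·)) :
    (pvMergeRuns xs ys).Pairwise (· ≤ ·) := by
  fun_induction pvMergeRuns xs ys with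
  | case1 ys => exact hy
  | case2 x xs => exact hx
  | case3 x xs y ys h ih =>
    rw [List.pairwise_cons]
    refine ⟨?_, ih hx.tail hy⟩
    intro z hz
    have hz' : z ∈ xs ++ (y :: ys) := (pvMergeRuns_perm _ _).mem_iff.mp hz
    rcases List.mem_append.mp hz' with hz' | hz'
    · exact List.rel_of_pairwise_cons hx hz'
    · rcases List.mem_cons.mp hz' with rfl | hz''
      · exact h
      · exact le_trans h (List.rel_of_pairwise_cons hy hz'')
  | case4 x xs y ys h ih =>
    rw [List.pairwise_cons]
    refine ⟨?_, ih hx hy.tail⟩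
    intro z hz
    have hz' : z ∈ (x :: xs) ++ ys := (pvMergeRuns_perm _ _).mem_iff.mp hz
    rcases List.mem_append.mp hz' with hz' | hz'
    · rcases List.mem_cons.mp hz' with rfl | hz''
      · omega
      · have := List.rel_of_pairwise_cons hx hz''; omega
    · exact List.rel_of_pairwise_cons hy hz'

lemma run_pairwise (a step : Int) (h : 0 ≤ step) :
    ((PySem.List.pyRange 0 8 1).map (fun k => a + k * step)).Pairwise (· ≤ ·) := by
  refine List.Pairwise.map _ ?_ (PySem.List.pairwise_lt_pyRange_one (a := 0) (b := 8))
  intro p q hpq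
  have : p * step ≤ q * step := mul_le_mul_of_nonneg_right (le_of_lt hpq) h
  omega

lemma sorted_append_runs (r1 r2 : List Int)
    (h1 : r1.Pairwise (· ≤ ·)) (h2 : r2.Pairwise (· ≤ ·)) :
    PySem.List.sorted (r1 ++ r2) (fun x => x) false = pvMergeRuns r1 r2 :=
  PySem.List.sorted_id_eq_of_perm_of_pairwise _ _ (pvMergeRuns_perm r1 r2)
    (pvMergeRuns_pairwise r1 r2 h1 h2)

-- the two ends "len(l1) - 1" and "nb_shifts - 1" generate the same range
lemma range_toNat_sub_one (m : Int) :
    PySem.List.pyRange 0 ((m.toNat : Int) - 1) 1 = PySem.List.pyRange 0 (m - 1) 1 := by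
  by_cases h : 0 ≤ m
  · rw [Int.toNat_of_nonneg h]
  · rw [PySem.List.pyRange_one_eq_nil (by omega), PySem.List.pyRange_one_eq_nil (by omega)]

theorem sample_modulo_2frame_eq (begin end_ : Int) :
    sample_modulo_2frame begin end_ = sample_modulo_2frame_alt begin end_ := by
  unfold sample_modulo_2frame sample_modulo_1frame_port sample_modulo_2frame_alt
  simp only [PySem.List.foldl_append_singleton_eq_map, List.nil_append]
  set n := end_ - begin + 1 with hn
  set step := -(PySem.Int.floordiv (-n) 8) with hstepdef
  have hstep : (step - 1) * 8 < n ∧ n ≤ step * 8 :=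
    (PySem.Int.neg_floordiv_neg_eq_iff_of_pos (by norm_num)).mp rfl
  rw [List.length_map, PySem.List.length_pyRange_one]
  have h8 : step - (8 * step - n) = n - 7 * step := by ring
  rw [h8, range_toNat_sub_one]
  have h0 : n - 7 * step - 0 - 1 = n - 7 * step - 1 := by ring
  rw [h0]
  apply List.map_congr_left
  intro index hidx
  have hmem := (PySem.List.mem_pyRange_one).mp hidx
  -- bounds: 0 ≤ index and index + 1 < n - 7*step, hence step ≥ 2
  have hstep2 : 2 ≤ step := by omega
  -- the inner loop over range(index, index+2) is two lookups
  have hr2 : PySem.List.pyRange index (index + 2) 1 = [index, index + 1] := by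
    rw [PySem.List.pyRange_one_cons (by omega), PySem.List.pyRange_one_cons (by omega),
        PySem.List.pyRange_one_eq_nil (by omega)]
  rw [hr2]
  simp only [List.foldl_cons, List.foldl_nil, List.nil_append]
  rw [PySem.List.pyGetD_map_pyRange_of_nonneg _ _ _ _ (by omega) (by omega),
      PySem.List.pyGetD_map_pyRange_of_nonneg _ _ _ _ (by omega) (by omega)]
  have hfun : (fun k => begin + (index + 1) + k * step) = (fun k => begin + index + 1 + k * step) := by
    funext k; ring
  rw [hfun]
  exact sorted_append_runs _ _ (run_pairwise _ _ (by omega)) (run_pairwise _ _ (by omega))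

-- ===== VERDICT (by name: the statement is the Claim_ definition above) =====
theorem sample_modulo_2frame_spec : Claim_equal_sample_modulo_2frame := by
  intro begin end_ _
  unfold Spec_sample_modulo_2frame
  exact sample_modulo_2frame_eq begin end_
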